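-- pv_equiv track=rewrite | github.com/yubinnnn/ProblemSolving | Programmers/모의고사.py | solution
-- ===== SOURCE A (Python) =====
-- def solution(answers):
--     a1 = [1,2,3,4,5]
--     a2 = [2,1,2,3,2,4,2,5]
--     a3 = [3,3,1,1,2,2,4,4,5,5]
--     score = [0, 0, 0]
--     result = []
--
--     for idx, answer in enumerate(answers):
--         if answer == a1[idx%len(a1)]:
--             score[0] += 1
--         if answer == a2[idx%len(a2)]:
--             score[1] += 1
--         if answer == a3[idx%len(a3)]:
--             score[2] += 1
--
--     for idx, s in enumerate(score):
--         if s == max(score):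
--             result.append(idx+1)
--
--     return result
-- ===== SOURCE B (Python) =====
-- def solution(answers):
--     # Histogram pass: bucket answers by (index mod 40, value); 40 = lcm of the
--     # three pattern lengths, so each pattern's score is 40 table lookups.
--     cnt = {}
--     for i, a in enumerate(answers):
--         k = (i % 40, a)
--         cnt[k] = cnt.get(k, 0) + 1
--     patterns = [[1, 2, 3, 4, 5],
--                 [2, 1, 2, 3, 2, 4, 2, 5],
--                 [3, 3, 1, 1, 2, 2, 4, 4, 5, 5]]
--     scores = [sum(cnt.get((r, p[r % len(p)]), 0) for r in range(40)) for p in patterns]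
--     m = max(scores)
--     return [i + 1 for i, s in enumerate(scores) if s == m]
-- ===== Notes on version B (the rewrite author's own statement) =====
-- stated objective: alternative
-- what changed: A scores by comparing every answer against all three cyclic patterns in one interleaved loop; B makes a single histogram pass keyed by (index mod 40, answer) — 40 being the lcm of the pattern lengths — and then reads each pattern's score off the table with 40 dictionary lookups, so no pattern comparison ever touches the answer list.
import Mathlib
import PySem

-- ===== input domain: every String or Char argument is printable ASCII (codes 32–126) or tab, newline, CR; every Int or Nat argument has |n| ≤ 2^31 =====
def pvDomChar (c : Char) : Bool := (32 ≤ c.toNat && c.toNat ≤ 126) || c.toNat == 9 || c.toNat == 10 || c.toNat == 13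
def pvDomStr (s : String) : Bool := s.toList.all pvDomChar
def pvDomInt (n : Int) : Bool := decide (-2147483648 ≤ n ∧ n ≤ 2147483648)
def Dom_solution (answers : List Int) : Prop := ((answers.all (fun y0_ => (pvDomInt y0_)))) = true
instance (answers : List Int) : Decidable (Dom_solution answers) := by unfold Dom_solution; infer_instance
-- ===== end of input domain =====

-- B replaces A's per-element three-way pattern comparison by a one-pass histogram keyed by
-- (index mod 40, answer); each score is then read off by 40 table lookups (objective: alternative).

-- ===== PORT A =====
-- A's mutable 3-element score list is represented as a triple of counters, updated in the same
-- order by the same three independent if-tests; the result loop appends idx+1 like A's.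
def solution (answers : List Int) : List Int :=
  let a1 : List Int := [1, 2, 3, 4, 5]
  let a2 : List Int := [2, 1, 2, 3, 2, 4, 2, 5]
  let a3 : List Int := [3, 3, 1, 1, 2, 2, 4, 4, 5, 5]
  let score : Int × Int × Int :=
    (PySem.List.enumerate answers 0).foldl (fun s p =>
      let s := if p.2 == PySem.List.pyGetD a1 (PySem.Int.mod p.1 (a1.length : Int)) 0 then
                 (s.1 + 1, s.2.1, s.2.2) else s
      let s := if p.2 == PySem.List.pyGetD a2 (PySem.Int.mod p.1 (a2.length : Int)) 0 then
                 (s.1, s.2.1 + 1, s.2.2) else s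
      let s := if p.2 == PySem.List.pyGetD a3 (PySem.Int.mod p.1 (a3.length : Int)) 0 then
                 (s.1, s.2.1, s.2.2 + 1) else s
      s) (0, 0, 0)
  let scoreList : List Int := [score.1, score.2.1, score.2.2]
  (PySem.List.enumerate scoreList 0).foldl (fun r p =>
    if p.2 == (PySem.List.max? scoreList (fun y => y)).getD 0 then r ++ [p.1 + 1] else r) []

-- ===== PORT B =====
-- the loop 'k = (i % 40, a); cnt[k] = cnt.get(k, 0) + 1' is Dict.modify per element;
-- 'sum(cnt.get((r, p[r % len(p)]), 0) for r in range(40))' is the mapped sum over pyRange 0 40;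
-- the result comprehension is filter + map over the enumerated scores.
def solution_alt (answers : List Int) : List Int :=
  let cnt : PySem.Dict (Int × Int) Int :=
    (PySem.List.enumerate answers 0).foldl
      (fun d p => d.modify (PySem.Int.mod p.1 40, p.2) 0 (· + 1)) PySem.Dict.empty
  let patterns : List (List Int) :=
    [[1, 2, 3, 4, 5], [2, 1, 2, 3, 2, 4, 2, 5], [3, 3, 1, 1, 2, 2, 4, 4, 5, 5]]
  let scores : List Int := patterns.map (fun p =>
    ((PySem.List.pyRange 0 40).map (fun r =>
      cnt.getD (r, PySem.List.pyGetD p (PySem.Int.mod r (p.length : Int)) 0) 0)).sum)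
  let m : Int := (PySem.List.max? scores (fun y => y)).getD 0
  ((PySem.List.enumerate scores 0).filter (fun p => p.2 == m)).map (fun p => p.1 + 1)

-- ===== PRECONDITION & SPEC =====
def Spec_solution (answers : List Int) (out : List Int) : Prop := out = solution_alt answers
instance (answers : List Int) (out : List Int) : Decidable (Spec_solution answers out) := by unfold Spec_solution; infer_instance

-- ===== CLAIM (what is proved, stated in full; the proofs are below) =====
def Claim_equal_solution : Prop := ∀ (answers : List Int), Dom_solution answers → Spec_solution answers (solution answers)

-- ===== LEMMAS AND PROOFS =====

theorem sum_map_range_int (N : Nat) (f : Nat → Int) :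
    ((List.range N).map f).sum = ∑ r ∈ Finset.range N, f r := by
  induction N with
  | zero => simp
  | succ n ih => rw [List.range_succ, Finset.sum_range_succ]; simp [ih]

-- An indicator sum over range N collapses at the unique matching residue m = av.1.
theorem sum_indicator_range (N m : Nat) (hm : m < N) (g : Int → Int) (av : Int × Int)
    (ha : av.1 = ((m : Nat) : Int)) :
    ((List.range N).map (fun (r : Nat) =>
        (if (av = ((r : Int), g (r : Int))) then (1 : Int) else 0))).sum
      = if av.2 = g ((m : Nat) : Int) then 1 else 0 := by
  obtain ⟨a1, a2⟩ := av
  simp only at ha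
  subst ha
  rw [sum_map_range_int]
  have hstep : ∀ r ∈ Finset.range N,
      (if ((((m : Nat) : Int), a2) = ((r : Int), g (r : Int))) then (1 : Int) else 0)
        = if r = m then (if a2 = g ((m : Nat) : Int) then 1 else 0) else 0 := by
    intro r _
    by_cases hr : r = m
    · subst hr; simp [Prod.mk.injEq]
    · simp only [Prod.mk.injEq]
      simp [hr]
      exact fun h2 => (hr h2.symm).elim
  rw [Finset.sum_congr rfl hstep,
      Finset.sum_ite_eq' (Finset.range N) m (fun _ => if a2 = g ((m : Nat) : Int) then (1:Int) else 0)]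
  simp [Finset.mem_range.mpr hm]

-- Σ_{r<N} count of (r, g r) in l = countP (k.2 == g k.1) when every key of l is a Nat < N.
set_option maxRecDepth 4096 in
theorem sum_count_eq_countP (l : List (Int × Int)) (g : Int → Int) (N : Nat)
    (h : ∀ k ∈ l, ∃ m : Nat, m < N ∧ k.1 = (m : Int)) :
    ((List.range N).map (fun (r : Nat) => (l.count (((r : Int)), g (r : Int)) : Int))).sum
      = (l.countP (fun k => k.2 == g k.1) : Int) := by
  induction l with
  | nil => simp
  | cons a t ih =>
    obtain ⟨m, hm, ha⟩ := h a (List.mem_cons_self ..)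
    simp only [List.count_cons]
    push_cast
    simp only [beq_iff_eq]
    rw [PySem.List.sum_map_add_int, ih (fun k hk => h k (List.mem_cons_of_mem _ hk))]
    rw [sum_indicator_range N m hm g a ha]
    rw [List.countP_cons]
    have hga : g a.1 = g ((m : Nat) : Int) := by rw [ha]
    by_cases hc : a.2 = g ((m : Nat) : Int)
    · simp [hc, hga]
    · simp [hc, hga]

-- Each per-pattern 40-lookup read-off from the histogram equals A's per-pattern match count.
theorem score_component (answers pat : List Int) (hdvd : pat.length ∣ 40) :
    ((PySem.List.pyRange 0 40).map (fun r =>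
        (PySem.Dict.counter ((PySem.List.enumerate answers 0).map
            (fun p => (PySem.Int.mod p.1 40, p.2)))).getD
          (r, PySem.List.pyGetD pat (PySem.Int.mod r (pat.length : Int)) 0) 0)).sum
      = ((PySem.List.enumerate answers 0).countP
          (fun p => p.2 == PySem.List.pyGetD pat (PySem.Int.mod p.1 (pat.length : Int)) 0) : Int) := by
  have h40 : PySem.List.pyRange 0 40 = (List.range 40).map (fun (k : Nat) => (k : Int)) := by decide
  rw [h40, List.map_map]
  simp only [Function.comp_def, PySem.Dict.getD_counter]
  rw [sum_count_eq_countP _ (fun r => PySem.List.pyGetD pat (PySem.Int.mod r (pat.length : Int)) 0) 40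
      (by
        intro k hk
        obtain ⟨p, hp, rfl⟩ := List.mem_map.mp hk
        obtain ⟨j, hj, rfl⟩ := (PySem.List.mem_enumerate_iff ..).mp hp
        refine ⟨j % 40, Nat.mod_lt _ (by omega), ?_⟩
        simp)]
  rw [List.countP_map]
  refine congrArg (fun n : Nat => (n : Int)) (List.countP_congr ?_)
  intro p hp
  obtain ⟨j, hj, rfl⟩ := (PySem.List.mem_enumerate_iff ..).mp hp
  simp only [Function.comp_apply, zero_add]
  have : PySem.Int.mod (PySem.Int.mod ((j : Nat) : Int) 40) ((pat.length : Nat) : Int)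
      = PySem.Int.mod ((j : Nat) : Int) ((pat.length : Nat) : Int) := by
    have h1 : ((40 : Nat) : Int) = (40 : Int) := by norm_num
    rw [← h1, PySem.Int.mod_natCast, PySem.Int.mod_natCast, PySem.Int.mod_natCast,
        Nat.mod_mod_of_dvd j hdvd]
  rw [this]

-- The interleaved triple fold of A splits into three independent component folds.
theorem solution_fold_split (c1 c2 c3 : Int × Int → Bool) (l : List (Int × Int)) (x y z : Int) :
    l.foldl (fun s p =>
      let s := if c1 p then ((s : Int × Int × Int).1 + 1, s.2.1, s.2.2) else s
      let s := if c2 p then (s.1, s.2.1 + 1, s.2.2) else s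
      let s := if c3 p then (s.1, s.2.1, s.2.2 + 1) else s
      s) (x, y, z)
    = (l.foldl (fun a p => if c1 p then a + 1 else a) x,
       l.foldl (fun a p => if c2 p then a + 1 else a) y,
       l.foldl (fun a p => if c3 p then a + 1 else a) z) := by
  induction l generalizing x y z with
  | nil => rfl
  | cons h t ih =>
    simp only [List.foldl_cons]
    by_cases h1 : c1 h <;> by_cases h2 : c2 h <;> by_cases h3 : c3 h <;>
      simp [h1, h2, h3, ih]

theorem solution_main_eq (answers : List Int) : solution answers = solution_alt answers := by
  unfold solution solution_alt
  have hcnt : (PySem.List.enumerate answers 0).foldl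
      (fun d p => d.modify (PySem.Int.mod p.1 40, p.2) 0 (· + 1)) PySem.Dict.empty
      = PySem.Dict.counter ((PySem.List.enumerate answers 0).map
          (fun p => (PySem.Int.mod p.1 40, p.2))) := by
    rw [PySem.Dict.counter_eq_foldl, List.foldl_map]
  simp only [hcnt, List.map]
  rw [score_component answers [1,2,3,4,5] (by decide),
      score_component answers [2,1,2,3,2,4,2,5] (by decide),
      score_component answers [3,3,1,1,2,2,4,4,5,5] (by decide)]
  rw [solution_fold_split]
  simp only [PySem.List.foldl_if_add_one, zero_add]
  rw [PySem.List.foldl_append_if]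
  simp

-- ===== VERDICT (by name: the statement is the Claim_ definition above) =====
theorem solution_spec : Claim_equal_solution := by
  intro answers _
  exact solution_main_eq answers
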